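-- pv_equiv track=rewrite | github.com/FGG100y/lc-brain-gym | src/2024E-HWOD/greedy_虚拟游戏理财/tmp.py | max_investment
-- ===== SOURCE A (Python) =====
-- def max_investment(products, total_investment, max_risk, returns, risks, limits):
--     # 记录最佳投资方式
--     best_investment = [0] * products
--     max_return = 0
--
--     # 枚举两个产品的组合
--     for i in range(products):
--         for j in range(i+1, products):
--             # 投资i和j产品的最大可能组合
--             for invest_i in range(0, min(limits[i], total_investment) + 1):
--                 invest_j = min(limits[j], total_investment - invest_i)
--
--                 if invest_j <= limits[j]:
--                     # 计算当前组合的总风险和总回报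
--                     total_risk = risks[i]+ risks[j]
--                     total_return = returns[i] * invest_i + returns[j] * invest_j
--
--                     # 如果总风险在可接受范围内，且回报更优，更新最佳方案
--                     if total_risk <= max_risk and total_return > max_return:
--                         max_return = total_return
--                         best_investment = [0] * products
--                         best_investment[i] = invest_i
--                         best_investment[j] = invest_j
--
--
--     return best_investment
-- ===== SOURCE B (Python) =====
-- def max_investment(products, total_investment, max_risk, returns, risks, limits):
--     # Per pair, the return as a function of invest_i is piecewise linear, so its
--     # maximum (and smallest argmax, matching A's first-strict-improvement rule)
--     # is attained at one of three candidate points: no scan over invest_i.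
--     best = [0] * products
--     best_return = 0
--     for i in range(products):
--         for j in range(i + 1, products):
--             if risks[i] + risks[j] > max_risk:
--                 continue
--             hi = min(limits[i], total_investment)
--             if hi < 0:
--                 continue
--             T = total_investment
--             r1, r2, l2 = returns[i], returns[j], limits[j]
--
--             def f(a):
--                 return r1 * a + r2 * min(l2, T - a)
--
--             bcl = min(max(T - l2, 0), hi)
--             m = max(f(0), f(bcl), f(hi))
--             a_star = 0 if f(0) == m else (bcl if f(bcl) == m else hi)
--             if m > best_return:
--                 best_return = m
--                 best = [0] * products
--                 best[i] = a_star
--                 best[j] = min(l2, T - a_star)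
--     return best
-- ===== Notes on version B (the rewrite author's own statement) =====
-- stated objective: faster
-- what changed: A scans every feasible invest_i per product pair (O(products^2 * total_investment)); B exploits that the pair return is piecewise linear in invest_i and evaluates only the two endpoints and the breakpoint, picking the smallest argmax to reproduce A's first-strict-improvement tie-breaking (O(products^2)).
-- outside the precondition, e.g. on max_investment(2, -1, 0, [], [], [0, 0]): A returns [0, 0], B raises IndexError
import Mathlib
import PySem

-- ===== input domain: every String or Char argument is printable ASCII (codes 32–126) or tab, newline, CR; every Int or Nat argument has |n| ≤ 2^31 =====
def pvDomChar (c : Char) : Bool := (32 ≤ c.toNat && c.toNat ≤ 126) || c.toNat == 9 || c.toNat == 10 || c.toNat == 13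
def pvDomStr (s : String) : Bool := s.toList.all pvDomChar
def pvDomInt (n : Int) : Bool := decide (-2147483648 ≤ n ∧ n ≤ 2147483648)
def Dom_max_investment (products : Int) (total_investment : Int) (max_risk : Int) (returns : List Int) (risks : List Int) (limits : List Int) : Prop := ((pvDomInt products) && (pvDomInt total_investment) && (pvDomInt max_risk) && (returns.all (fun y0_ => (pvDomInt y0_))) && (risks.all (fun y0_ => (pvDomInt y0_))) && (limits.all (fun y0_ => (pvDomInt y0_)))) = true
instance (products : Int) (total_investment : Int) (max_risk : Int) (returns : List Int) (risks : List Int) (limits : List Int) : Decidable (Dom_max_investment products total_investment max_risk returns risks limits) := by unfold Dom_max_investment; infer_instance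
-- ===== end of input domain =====

-- B replaces A's scan over every invest_i by evaluating the piecewise-linear pair return
-- at its three candidate points (endpoints and breakpoint); measured faster on large inputs.

-- ===== PORT A =====
def max_investment (products : Int) (total_investment : Int) (max_risk : Int) (returns : List Int) (risks : List Int) (limits : List Int) : List Int :=
  let st :=
    (PySem.List.pyRange 0 products 1).foldl (fun st i =>
      (PySem.List.pyRange (i + 1) products 1).foldl (fun st j =>
        (PySem.List.pyRange 0 (min (PySem.List.pyGetD limits i 0) total_investment + 1) 1).foldl
          (fun st invest_i =>
            let invest_j := min (PySem.List.pyGetD limits j 0) (total_investment - invest_i)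
            if invest_j ≤ PySem.List.pyGetD limits j 0 then
              let total_risk := PySem.List.pyGetD risks i 0 + PySem.List.pyGetD risks j 0
              let total_return := PySem.List.pyGetD returns i 0 * invest_i + PySem.List.pyGetD returns j 0 * invest_j
              if total_risk ≤ max_risk ∧ total_return > st.1 then
                (total_return,
                  ((List.replicate products.toNat (0 : Int)).set i.toNat invest_i).set j.toNat invest_j)
              else st
            else st)
          st) st)
      ((0 : Int), List.replicate products.toNat (0 : Int))
  st.2

-- ===== PORT B =====
-- the local function f of Source B: the pair return when i gets a
def pvF (r1 r2 l2 T a : Int) : Int := r1 * a + r2 * min l2 (T - a)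

def max_investment_alt (products : Int) (total_investment : Int) (max_risk : Int) (returns : List Int) (risks : List Int) (limits : List Int) : List Int :=
  let st :=
    (PySem.List.pyRange 0 products 1).foldl (fun st i =>
      (PySem.List.pyRange (i + 1) products 1).foldl (fun st j =>
        if PySem.List.pyGetD risks i 0 + PySem.List.pyGetD risks j 0 > max_risk then st
        else
          if min (PySem.List.pyGetD limits i 0) total_investment < 0 then st
          else
            let r1 := PySem.List.pyGetD returns i 0
            let r2 := PySem.List.pyGetD returns j 0
            let l2 := PySem.List.pyGetD limits j 0
            let hi := min (PySem.List.pyGetD limits i 0) total_investment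
            let bcl := min (max (total_investment - l2) 0) hi
            let m := max (pvF r1 r2 l2 total_investment 0)
                       (max (pvF r1 r2 l2 total_investment bcl) (pvF r1 r2 l2 total_investment hi))
            let astar := if pvF r1 r2 l2 total_investment 0 = m then 0
                         else if pvF r1 r2 l2 total_investment bcl = m then bcl else hi
            if m > st.1 then
              (m, ((List.replicate products.toNat (0 : Int)).set i.toNat astar).set j.toNat
                    (min l2 (total_investment - astar)))
            else st) st)
      ((0 : Int), List.replicate products.toNat (0 : Int))
  st.2

-- ===== PRECONDITION & SPEC =====
-- Pre_ excludes inputs where the three lists are shorter than `products` (indexed up to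
-- products-1 when two products exist); A raises IndexError on virtually all of them, though
-- on a few A happens to return [0]*products because its inner range is empty before the
-- short list is touched — B indexes the lists unconditionally per pair and raises there.
def Pre_max_investment (products : Int) (total_investment : Int) (max_risk : Int) (returns : List Int) (risks : List Int) (limits : List Int) : Prop :=
  products ≤ 1 ∨ (products ≤ (returns.length : Int) ∧ products ≤ (risks.length : Int) ∧ products ≤ (limits.length : Int))
instance (products : Int) (total_investment : Int) (max_risk : Int) (returns : List Int) (risks : List Int) (limits : List Int) : Decidable (Pre_max_investment products total_investment max_risk returns risks limits) := by unfold Pre_max_investment; infer_instance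

def pvWitness_max_investment : Int × Int × Int × List Int × List Int × List Int :=
  (2, 10, 5, [3, 2], [1, 1], [4, 6])

def Spec_max_investment (products : Int) (total_investment : Int) (max_risk : Int) (returns : List Int) (risks : List Int) (limits : List Int) (out : List Int) : Prop := out = max_investment_alt products total_investment max_risk returns risks limits
instance (products : Int) (total_investment : Int) (max_risk : Int) (returns : List Int) (risks : List Int) (limits : List Int) (out : List Int) : Decidable (Spec_max_investment products total_investment max_risk returns risks limits out) := by unfold Spec_max_investment; infer_instance

-- ===== CLAIM (what is proved, stated in full; the proofs are below) =====
def Claim_equal_max_investment : Prop := ∀ (products : Int) (total_investment : Int) (max_risk : Int) (returns : List Int) (risks : List Int) (limits : List Int), Dom_max_investment products total_investment max_risk returns risks limits → Pre_max_investment products total_investment max_risk returns risks limits → Spec_max_investment products total_investment max_risk returns risks limits (max_investment products total_investment max_risk returns risks limits)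

-- ===== LEMMAS AND PROOFS =====

-- (max, leftmost argmax) of f over a list, preferring earlier elements on ties
def pvBestOf (f : Int → Int) : List Int → Option (Int × Int)
  | [] => none
  | a :: l =>
    match pvBestOf f l with
    | none => some (f a, a)
    | some (m, x) => if m ≤ f a then some (f a, a) else some (m, x)

theorem pvFoldl_id (l : List Int) (st : Int × List Int) :
    l.foldl (fun st _ => st) st = st := by
  induction l generalizing st with
  | nil => rfl
  | cons a l ih => simpa using ih st

-- A's running-max loop computes exactly pvBestOf (first strict improvement wins)
theorem pvFoldl_best (f : Int → Int) (rec : Int → List Int) (l : List Int) (st : Int × List Int) :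
    l.foldl (fun st a => if f a > st.1 then (f a, rec a) else st) st =
      (match pvBestOf f l with
       | none => st
       | some (m, x) => if m > st.1 then (m, rec x) else st) := by
  induction l generalizing st with
  | nil => rfl
  | cons a l ih =>
    simp only [List.foldl_cons, pvBestOf]
    rw [ih]
    cases h : pvBestOf f l with
    | none =>
      by_cases h2 : f a > st.1 <;> simp [h2]
    | some p =>
      obtain ⟨m, x⟩ := p
      simp only []
      by_cases h1 : m ≤ f a <;> by_cases h2 : f a > st.1 <;>
        simp only [h1, h2, if_true, if_false, ite_true, ite_false] <;>
        split_ifs <;> first | rfl | omega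

theorem pvBestOf_suffix (f : Int → Int) (hi x : Int) (hx0 : 0 ≤ x) (hxhi : x ≤ hi)
    (hub : ∀ a, 0 ≤ a → a ≤ hi → f a ≤ f x)
    (hstrict : ∀ a, 0 ≤ a → a < x → f a < f x) :
    ∀ (k : Nat) (lo : Int), 0 ≤ lo → lo + k = hi + 1 →
      (lo ≤ x → pvBestOf f (PySem.List.pyRange lo (hi + 1) 1) = some (f x, x)) ∧
      (∀ m y, pvBestOf f (PySem.List.pyRange lo (hi + 1) 1) = some (m, y) → m ≤ f x) := by
  intro k
  induction k with
  | zero =>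
    intro lo hlo0 hk
    rw [PySem.List.pyRange_one_eq_nil (by omega)]
    constructor
    · intro h; omega
    · intro m y h; simp [pvBestOf] at h
  | succ k ih =>
    intro lo hlo0 hk
    rw [PySem.List.pyRange_one_cons (by omega)]
    obtain ⟨ih1, ih2⟩ := ih (lo + 1) (by omega) (by omega)
    cases h : pvBestOf f (PySem.List.pyRange (lo + 1) (hi + 1) 1) with
    | none =>
      have hxlo : ¬ (lo + 1 ≤ x) := by
        intro hc
        rw [ih1 hc] at h
        cases h
      constructor
      · intro hlox
        have hxeq : x = lo := by omega
        subst hxeq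
        simp [pvBestOf, h]
      · intro m y hmy
        simp only [pvBestOf, h] at hmy
        obtain ⟨h1, h2⟩ := Prod.mk.inj (Option.some.inj hmy)
        rw [← h1]
        exact hub lo hlo0 (by omega)
    | some p =>
      obtain ⟨m, y⟩ := p
      have hm : m ≤ f x := ih2 m y h
      constructor
      · intro hlox
        rcases eq_or_lt_of_le hlox with heq | hlt2
        · simp only [pvBestOf, h]
          rw [if_pos (by rw [← heq] at hm; exact hm)]
          rw [heq]
        · have h' := ih1 (by omega)
          rw [h] at h'
          obtain ⟨hmx, hyx⟩ := Prod.mk.inj (Option.some.inj h')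
          have hflo : f lo < f x := hstrict lo hlo0 hlt2
          simp only [pvBestOf, h]
          rw [if_neg (by omega), hmx, hyx]
      · intro m' y' hmy
        simp only [pvBestOf, h] at hmy
        split_ifs at hmy with hc
        · obtain ⟨h1, h2⟩ := Prod.mk.inj (Option.some.inj hmy)
          rw [← h1]
          exact hub lo hlo0 (by omega)
        · obtain ⟨h1, h2⟩ := Prod.mk.inj (Option.some.inj hmy)
          rw [← h1]; exact hm

theorem pvBestOf_range (f : Int → Int) (hi x : Int) (hx0 : 0 ≤ x) (hxhi : x ≤ hi)
    (hub : ∀ a, 0 ≤ a → a ≤ hi → f a ≤ f x)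
    (hstrict : ∀ a, 0 ≤ a → a < x → f a < f x) :
    pvBestOf f (PySem.List.pyRange 0 (hi + 1) 1) = some (f x, x) :=
  (pvBestOf_suffix f hi x hx0 hxhi hub hstrict (hi + 1).toNat 0 le_rfl (by omega)).1 hx0

-- the chosen candidate attains the candidate maximum
theorem pvAstar_attains (r1 r2 l2 T hi : Int) :
    pvF r1 r2 l2 T
        (if pvF r1 r2 l2 T 0 = max (pvF r1 r2 l2 T 0)
              (max (pvF r1 r2 l2 T (min (max (T - l2) 0) hi)) (pvF r1 r2 l2 T hi)) then 0
         else if pvF r1 r2 l2 T (min (max (T - l2) 0) hi) = max (pvF r1 r2 l2 T 0)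
              (max (pvF r1 r2 l2 T (min (max (T - l2) 0) hi)) (pvF r1 r2 l2 T hi)) then
           min (max (T - l2) 0) hi
         else hi) =
      max (pvF r1 r2 l2 T 0)
        (max (pvF r1 r2 l2 T (min (max (T - l2) 0) hi)) (pvF r1 r2 l2 T hi)) := by
  split_ifs with h1 h2
  · exact h1
  · exact h2
  · omega

-- upper bound: every feasible invest_i is beaten by one of the three candidates
theorem pvCand_ub (r1 r2 l2 T hi : Int) (hhi0 : 0 ≤ hi) (hhiT : hi ≤ T)
    (a : Int) (ha0 : 0 ≤ a) (hahi : a ≤ hi) :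
    pvF r1 r2 l2 T a ≤
      max (pvF r1 r2 l2 T 0)
        (max (pvF r1 r2 l2 T (min (max (T - l2) 0) hi)) (pvF r1 r2 l2 T hi)) := by
  set bcl := min (max (T - l2) 0) hi with hbcl
  rcases le_or_gt a (T - l2) with hseg | hseg
  · -- segment 1: slope r1, valid on [0, bcl]
    have hB0 : 0 ≤ T - l2 := by omega
    have hb1 : bcl ≤ T - l2 := by omega
    have habcl : a ≤ bcl := by omega
    have e0 : pvF r1 r2 l2 T 0 = r1 * 0 + r2 * l2 := by
      unfold pvF; rw [min_eq_left (by omega)]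
    have ea : pvF r1 r2 l2 T a = r1 * a + r2 * l2 := by
      unfold pvF; rw [min_eq_left (by omega)]
    have eb : pvF r1 r2 l2 T bcl = r1 * bcl + r2 * l2 := by
      unfold pvF; rw [min_eq_left (by omega)]
    rcases le_or_gt 0 r1 with hr | hr
    · have hmul : r1 * a ≤ r1 * bcl := mul_le_mul_of_nonneg_left habcl hr
      refine le_trans ?_ (le_max_of_le_right (le_max_left _ _))
      rw [ea, eb]; linarith
    · have hmul : r1 * a ≤ r1 * 0 := mul_le_mul_of_nonpos_left ha0 (le_of_lt hr)
      refine le_trans ?_ (le_max_left _ _)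
      rw [ea, e0]; linarith
  · -- segment 2: slope r1 - r2, valid on [bcl, hi]
    have hbge : T - l2 ≤ bcl := by omega
    have hba : bcl ≤ a := by omega
    have ea : pvF r1 r2 l2 T a = r1 * a + r2 * (T - a) := by
      unfold pvF; rw [min_eq_right (by omega)]
    have eb : pvF r1 r2 l2 T bcl = r1 * bcl + r2 * (T - bcl) := by
      unfold pvF; rw [min_eq_right (by omega)]
    have eh : pvF r1 r2 l2 T hi = r1 * hi + r2 * (T - hi) := by
      unfold pvF; rw [min_eq_right (by omega)]
    rcases le_or_gt r2 r1 with hr | hr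
    · have hmul : (r1 - r2) * a ≤ (r1 - r2) * hi :=
        mul_le_mul_of_nonneg_left hahi (by omega)
      refine le_trans ?_ (le_max_of_le_right (le_max_right _ _))
      rw [ea, eh]; nlinarith [hmul]
    · have hmul : (r1 - r2) * a ≤ (r1 - r2) * bcl :=
        mul_le_mul_of_nonpos_left hba (by omega)
      refine le_trans ?_ (le_max_of_le_right (le_max_left _ _))
      rw [ea, eb]; nlinarith [hmul]

-- strictness: everything strictly left of the chosen candidate is strictly worse
theorem pvCand_strict (r1 r2 l2 T hi : Int) (hhi0 : 0 ≤ hi) (hhiT : hi ≤ T)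
    (a : Int) (ha0 : 0 ≤ a)
    (ha : a < (if pvF r1 r2 l2 T 0 = max (pvF r1 r2 l2 T 0)
              (max (pvF r1 r2 l2 T (min (max (T - l2) 0) hi)) (pvF r1 r2 l2 T hi)) then 0
         else if pvF r1 r2 l2 T (min (max (T - l2) 0) hi) = max (pvF r1 r2 l2 T 0)
              (max (pvF r1 r2 l2 T (min (max (T - l2) 0) hi)) (pvF r1 r2 l2 T hi)) then
           min (max (T - l2) 0) hi
         else hi)) :
    pvF r1 r2 l2 T a <
      max (pvF r1 r2 l2 T 0)
        (max (pvF r1 r2 l2 T (min (max (T - l2) 0) hi)) (pvF r1 r2 l2 T hi)) := by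
  set bcl := min (max (T - l2) 0) hi with hbcl
  set M := max (pvF r1 r2 l2 T 0) (max (pvF r1 r2 l2 T bcl) (pvF r1 r2 l2 T hi)) with hM
  have hub0 : pvF r1 r2 l2 T 0 ≤ M := le_max_left _ _
  have hubb : pvF r1 r2 l2 T bcl ≤ M := le_max_of_le_right (le_max_left _ _)
  split_ifs at ha with h1 h2
  · omega
  · -- a < bcl, and pvF bcl = M, pvF 0 < M
    have hF0 : pvF r1 r2 l2 T 0 < M := by omega
    have hbpos : 0 < bcl := by omega
    have hBpos : 0 < T - l2 := by omega
    have hbB : bcl ≤ T - l2 := by omega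
    have e0 : pvF r1 r2 l2 T 0 = r1 * 0 + r2 * l2 := by
      unfold pvF; rw [min_eq_left (by omega)]
    have ea : pvF r1 r2 l2 T a = r1 * a + r2 * l2 := by
      unfold pvF; rw [min_eq_left (by omega)]
    have eb : pvF r1 r2 l2 T bcl = r1 * bcl + r2 * l2 := by
      unfold pvF; rw [min_eq_left (by omega)]
    have hr1 : 0 < r1 := by
      rcases le_or_gt r1 0 with hr | hr
      · have : r1 * bcl ≤ 0 := mul_nonpos_of_nonpos_of_nonneg hr (by omega)
        rw [e0] at hF0; rw [eb] at h2; nlinarith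
      · exact hr
    have hmul : r1 * a < r1 * bcl := mul_lt_mul_of_pos_left ha hr1
    rw [← h2, ea, eb]; linarith
  · -- astar = hi: pvF 0 < M, pvF bcl < M, so pvF hi = M; a < hi
    have hFh : pvF r1 r2 l2 T hi = M := by omega
    have hF0 : pvF r1 r2 l2 T 0 < M := by omega
    have hFb : pvF r1 r2 l2 T bcl < M := by omega
    rcases le_or_gt a bcl with hab | hab
    · -- left part; here bcl < hi (values at bcl and hi differ)
      have hbne : bcl ≠ hi := by
        intro hc
        have : pvF r1 r2 l2 T bcl = pvF r1 r2 l2 T hi := by rw [hc]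
        omega
      have hblt : bcl < hi := by omega
      have hbeq : bcl = max (T - l2) 0 := by omega
      rcases le_or_gt (T - l2) 0 with hB | hB
      · -- bcl = 0, so a = 0
        have : a = 0 := by omega
        rw [this]; exact hF0
      · -- bcl = T - l2 > 0: segment 1 on [0, bcl]
        have e0 : pvF r1 r2 l2 T 0 = r1 * 0 + r2 * l2 := by
          unfold pvF; rw [min_eq_left (by omega)]
        have ea : pvF r1 r2 l2 T a = r1 * a + r2 * l2 := by
          unfold pvF; rw [min_eq_left (by omega)]
        have eb : pvF r1 r2 l2 T bcl = r1 * bcl + r2 * l2 := by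
          unfold pvF; rw [min_eq_left (by omega)]
        rcases le_or_gt 0 r1 with hr | hr
        · have hmul : r1 * a ≤ r1 * bcl := mul_le_mul_of_nonneg_left hab hr
          rw [ea]; rw [eb] at hFb; linarith
        · have hmul : r1 * a ≤ r1 * 0 := mul_le_mul_of_nonpos_left ha0 (le_of_lt hr)
          rw [ea]; rw [e0] at hF0; linarith
    · -- right part: bcl < a < hi, segment 2
      rcases le_or_gt (T - l2) bcl with hBb | hBb
      · have ea : pvF r1 r2 l2 T a = r1 * a + r2 * (T - a) := by
          unfold pvF; rw [min_eq_right (by omega)]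
        have eb : pvF r1 r2 l2 T bcl = r1 * bcl + r2 * (T - bcl) := by
          unfold pvF; rw [min_eq_right (by omega)]
        have eh : pvF r1 r2 l2 T hi = r1 * hi + r2 * (T - hi) := by
          unfold pvF; rw [min_eq_right (by omega)]
        have hslope : 0 < r1 - r2 := by
          rcases le_or_gt (r1 - r2) 0 with hs | hs
          · have hmul : (r1 - r2) * hi ≤ (r1 - r2) * bcl :=
              mul_le_mul_of_nonpos_left (by omega) hs
            rw [eb] at hFb; rw [eh] at hFh; nlinarith
          · exact hs
        have hmul : (r1 - r2) * a < (r1 - r2) * hi := mul_lt_mul_of_pos_left ha hslope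
        rw [ea]; rw [← hFh, eh]; nlinarith
      · -- then bcl = hi, contradiction with bcl < a < hi
        omega

-- the whole inner treatment of one pair (i, j): A's scan equals B's candidate evaluation
theorem pvPairStep (r1 r2 rk l1 l2 T mr : Int) (rec : Int → List Int) (st : Int × List Int) :
    (PySem.List.pyRange 0 (min l1 T + 1) 1).foldl
        (fun st a =>
          if min l2 (T - a) ≤ l2 then
            if rk ≤ mr ∧ r1 * a + r2 * min l2 (T - a) > st.1 then
              (r1 * a + r2 * min l2 (T - a), rec a)
            else st
          else st) st =
      (if rk > mr then st
       else if min l1 T < 0 then st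
       else
         let hi := min l1 T
         let bcl := min (max (T - l2) 0) hi
         let m := max (pvF r1 r2 l2 T 0) (max (pvF r1 r2 l2 T bcl) (pvF r1 r2 l2 T hi))
         let astar := if pvF r1 r2 l2 T 0 = m then 0
                      else if pvF r1 r2 l2 T bcl = m then bcl else hi
         if m > st.1 then (m, rec astar) else st) := by
  by_cases hrk : rk ≤ mr
  · rw [if_neg (by omega)]
    simp only [min_le_left, if_true, hrk, true_and]
    refine (pvFoldl_best (fun a => r1 * a + r2 * min l2 (T - a)) rec _ st).trans ?_
    by_cases hhi : min l1 T < 0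
    · rw [PySem.List.pyRange_one_eq_nil (by omega), if_pos hhi]
      rfl
    · rw [if_neg hhi]
      have hhi0 : 0 ≤ min l1 T := by omega
      have hhiT : min l1 T ≤ T := min_le_right _ _
      have hrange := pvBestOf_range (fun a => r1 * a + r2 * min l2 (T - a)) (min l1 T)
        (if pvF r1 r2 l2 T 0 = max (pvF r1 r2 l2 T 0)
              (max (pvF r1 r2 l2 T (min (max (T - l2) 0) (min l1 T))) (pvF r1 r2 l2 T (min l1 T))) then 0
         else if pvF r1 r2 l2 T (min (max (T - l2) 0) (min l1 T)) = max (pvF r1 r2 l2 T 0)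
              (max (pvF r1 r2 l2 T (min (max (T - l2) 0) (min l1 T))) (pvF r1 r2 l2 T (min l1 T))) then
           min (max (T - l2) 0) (min l1 T)
         else min l1 T)
        (by split_ifs <;> omega)
        (by split_ifs <;> omega)
        (fun a ha0 hahi => by
          have h := pvCand_ub r1 r2 l2 T (min l1 T) hhi0 hhiT a ha0 hahi
          have h2 := pvAstar_attains r1 r2 l2 T (min l1 T)
          calc (fun a => r1 * a + r2 * min l2 (T - a)) a = pvF r1 r2 l2 T a := rfl
            _ ≤ _ := by rw [← h2] at h; exact h)
        (fun a ha0 ha => by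
          have h := pvCand_strict r1 r2 l2 T (min l1 T) hhi0 hhiT a ha0 ha
          have h2 := pvAstar_attains r1 r2 l2 T (min l1 T)
          calc (fun a => r1 * a + r2 * min l2 (T - a)) a = pvF r1 r2 l2 T a := rfl
            _ < _ := by rw [← h2] at h; exact h)
      have hrange' : pvBestOf (fun a => r1 * a + r2 * min l2 (T - a))
          (PySem.List.pyRange 0 (min l1 T + 1) 1) =
          some (max (pvF r1 r2 l2 T 0)
              (max (pvF r1 r2 l2 T (min (max (T - l2) 0) (min l1 T))) (pvF r1 r2 l2 T (min l1 T))),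
            (if pvF r1 r2 l2 T 0 = max (pvF r1 r2 l2 T 0)
              (max (pvF r1 r2 l2 T (min (max (T - l2) 0) (min l1 T))) (pvF r1 r2 l2 T (min l1 T))) then 0
             else if pvF r1 r2 l2 T (min (max (T - l2) 0) (min l1 T)) = max (pvF r1 r2 l2 T 0)
              (max (pvF r1 r2 l2 T (min (max (T - l2) 0) (min l1 T))) (pvF r1 r2 l2 T (min l1 T))) then
               min (max (T - l2) 0) (min l1 T)
             else min l1 T)) := by
        rw [hrange]
        exact congrArg (fun z => some (z, _)) (pvAstar_attains r1 r2 l2 T (min l1 T))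
      rw [hrange']
  · rw [if_pos (by omega)]
    have hstep : (fun (st : Int × List Int) (a : Int) =>
          if min l2 (T - a) ≤ l2 then
            if rk ≤ mr ∧ r1 * a + r2 * min l2 (T - a) > st.1 then
              (r1 * a + r2 * min l2 (T - a), rec a)
            else st
          else st) = fun st _ => st := by
      funext st a
      simp [hrk]
    rw [hstep, pvFoldl_id]

-- ===== VERDICT (by name: the statement is the Claim_ definition above) =====
theorem max_investment_spec : Claim_equal_max_investment := by
  intro products T mr rs ks ls _ _
  unfold Spec_max_investment
  simp only [max_investment, max_investment_alt]
  refine congrArg Prod.snd ?_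
  refine congrFun (congrFun (congrArg List.foldl ?_) _) _
  funext st i
  refine congrFun (congrFun (congrArg List.foldl ?_) _) _
  funext st j
  exact pvPairStep (PySem.List.pyGetD rs i 0) (PySem.List.pyGetD rs j 0)
    (PySem.List.pyGetD ks i 0 + PySem.List.pyGetD ks j 0)
    (PySem.List.pyGetD ls i 0) (PySem.List.pyGetD ls j 0) T mr
    (fun a => ((List.replicate products.toNat (0 : Int)).set i.toNat a).set j.toNat
        (min (PySem.List.pyGetD ls j 0) (T - a))) st
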